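-- pv_equiv track=rewrite | github.com/kr2020lbh/Problem | Python/PROGRAMMERS/LEVEL 3/숫자게임.py | solution
-- ===== SOURCE A (Python) =====
-- def solution(A, B):
--     A.sort()
--     B.sort()
--     answer = 0
--     for i in range(len(B)):
--         if A[i] < B[i]:
--             answer += 1
--         else:
--             for j in range(i+1,len(B)):
--                 if A[i] < B[j]:
--                     B[i],B[j] = B[j],B[i]
--                     answer += 1
--                     break
--     return answer
-- ===== SOURCE B (Python) =====
-- def solution(A, B):
--     # Two-pointer greedy over both sorted lists; O(n log n). Unlike A, does not mutate its arguments.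
--     A_sorted = sorted(A)
--     count = 0
--     for b in sorted(B):
--         if count < len(A_sorted) and A_sorted[count] < b:
--             count += 1
--     return count
-- ===== Notes on version B (the rewrite author's own statement) =====
-- stated objective: faster
-- what changed: Replaces A's quadratic loop (which, for each position, rescans the rest of B and swaps elements in place) by a single two-pointer greedy pass over both sorted lists; B also does not mutate its arguments.
import Mathlib
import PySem

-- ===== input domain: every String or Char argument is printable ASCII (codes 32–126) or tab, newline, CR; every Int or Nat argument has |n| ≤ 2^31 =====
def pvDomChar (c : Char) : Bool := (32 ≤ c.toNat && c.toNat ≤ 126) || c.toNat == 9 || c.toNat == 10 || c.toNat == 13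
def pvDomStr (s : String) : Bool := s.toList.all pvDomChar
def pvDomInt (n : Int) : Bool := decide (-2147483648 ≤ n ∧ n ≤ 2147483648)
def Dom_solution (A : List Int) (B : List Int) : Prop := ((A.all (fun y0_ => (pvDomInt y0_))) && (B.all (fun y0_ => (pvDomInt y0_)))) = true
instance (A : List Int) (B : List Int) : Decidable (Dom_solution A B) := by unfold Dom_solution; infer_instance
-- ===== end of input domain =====

-- B replaces A's quadratic swap-and-rescan loop by one two-pointer greedy pass over the two
-- sorted lists (objective: faster). NOTE: the Python A sorts A and B and swaps inside B in
-- place; B does not mutate its arguments — the equivalence proved here is about the return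
-- value only.

-- ===== PORT A =====
-- A's inner 'for j in range(i+1, len(B)): … break' loop; the swap B[i],B[j] = B[j],B[i] is
-- ported by hand via PySem.List.pySetD/pyGetD (exact: i and the j's are in-range indices).
def solInner (ai : Int) (i : Int) : List Int → List Int × Int → List Int × Int
  | [], st => st
  | j :: js, st =>
    if ai < PySem.List.pyGetD st.1 j 0 then
      (PySem.List.pySetD (PySem.List.pySetD st.1 i (PySem.List.pyGetD st.1 j 0)) j
        (PySem.List.pyGetD st.1 i 0), st.2 + 1)
    else solInner ai i js st

-- Body of A's outer 'for i in range(len(B))' loop; state = (current B list, answer).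
def stepA (As : List Int) (st : List Int × Int) (i : Int) : List Int × Int :=
  if PySem.List.pyGetD As i 0 < PySem.List.pyGetD st.1 i 0 then (st.1, st.2 + 1)
  else solInner (PySem.List.pyGetD As i 0) i
    (PySem.List.pyRange (i + 1) (st.1.length : Int) 1) st

-- Port of A. A[i] raises IndexError when len(A) < len(B) — excluded by Pre_solution, where
-- pyGetD's default is unreachable.
def solution (A : List Int) (B : List Int) : Int :=
  let As := PySem.List.sorted A (fun x => x)
  let Bs := PySem.List.sorted B (fun x => x)
  ((PySem.List.pyRange 0 (Bs.length : Int) 1).foldl (stepA As) (Bs, 0)).2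

-- ===== PORT B =====
def solution_alt (A : List Int) (B : List Int) : Int :=
  let As := PySem.List.sorted A (fun x => x)
  (PySem.List.sorted B (fun x => x)).foldl
    (fun count b =>
      if count < (As.length : Int) ∧ PySem.List.pyGetD As count 0 < b then count + 1
      else count)
    0

-- ===== PRECONDITION & SPEC =====
-- Pre_ excludes exactly the inputs with len(A) < len(B), on which A raises IndexError
-- (it reads A[i] for every i in range(len(B))).
def Pre_solution (A : List Int) (B : List Int) : Prop := B.length ≤ A.length
instance (A : List Int) (B : List Int) : Decidable (Pre_solution A B) := by
  unfold Pre_solution; infer_instance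

def pvWitness_solution : List Int × List Int := ([1, 2], [1, 3])

def Spec_solution (A : List Int) (B : List Int) (out : Int) : Prop := out = solution_alt A B
instance (A : List Int) (B : List Int) (out : Int) : Decidable (Spec_solution A B out) := by
  unfold Spec_solution; infer_instance

-- ===== CLAIM (what is proved, stated in full; the proofs are below) =====
def Claim_equal_solution : Prop := ∀ (A : List Int) (B : List Int), Dom_solution A B → Pre_solution A B → Spec_solution A B (solution A B)

-- ===== LEMMAS AND PROOFS =====

-- A's loop, rephrased on the suffix of B it still works on: position i either beats
-- directly, or the first later beatable element is swapped in (the small B[i] taking its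
-- place), or nothing happens.
def fA : List Int → List Int → Int
  | a :: as, b :: bs =>
    if a < b then fA as bs + 1
    else
      match bs.findIdx? (fun x => a < x) with
      | some j => fA as (bs.set j b) + 1
      | none => fA as bs
  | _, _ => 0
termination_by as bs => bs.length
decreasing_by all_goals simp [List.length_set]

-- B's loop as a two-list recursion: consume b's in order, advance the a-pointer on a beat.
def gB : List Int → List Int → Int
  | _, [] => 0
  | [], _ :: _ => 0
  | a :: as, b :: bs => if a < b then gB as bs + 1 else gB (a :: as) bs
termination_by as bs => bs.length

lemma fA_nil (as : List Int) : fA as [] = 0 := by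
  cases as <;> simp [fA]

lemma fA_nil_left (bs : List Int) : fA [] bs = 0 := by
  cases bs <;> simp [fA]

lemma gB_nil_left (bs : List Int) : gB [] bs = 0 := by
  cases bs <;> simp [gB]

lemma gB_cons_cons (a b : Int) (as bs : List Int) :
    gB (a :: as) (b :: bs) = if a < b then gB as bs + 1 else gB (a :: as) bs := by
  simp [gB]

lemma getD_append_len (l₁ : List Int) (x : Int) (l₂ : List Int) (d : Int) :
    (l₁ ++ x :: l₂).getD l₁.length d = x := by
  induction l₁ with
  | nil => simp
  | cons y ys ih => simpa using ih

lemma set_append_len (l₁ : List Int) (x y : Int) (l₂ : List Int) :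
    (l₁ ++ x :: l₂).set l₁.length y = l₁ ++ y :: l₂ := by
  induction l₁ with
  | nil => simp
  | cons z zs ih => simpa using ih

-- A's inner scan over range(s, len L) finds the first j ≥ s with a < L[j] and swaps
-- positions k and j; expressed through findIdx? on the dropped suffix.
lemma solInner_eq (a : Int) (k : Nat) :
    ∀ (t s : Nat) (L : List Int) (ans : Int), L.length = s + t →
    solInner a (k : Int) (PySem.List.pyRange (s : Int) (L.length : Int) 1) (L, ans) =
      match (L.drop s).findIdx? (fun x => a < x) with
      | some j => ((L.set k (L.getD (s + j) 0)).set (s + j) (L.getD k 0), ans + 1)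
      | none => (L, ans) := by
  intro t
  induction t with
  | zero =>
    intro s L ans h
    rw [PySem.List.pyRange_one_eq_nil (by exact_mod_cast (by omega : L.length ≤ s))]
    rw [List.drop_eq_nil_of_le (by omega)]
    simp [solInner]
  | succ t ih =>
    intro s L ans h
    have hs : s < L.length := by omega
    rw [PySem.List.pyRange_one_cons (by exact_mod_cast hs)]
    rw [List.drop_eq_getElem_cons hs, List.findIdx?_cons]
    by_cases hab : a < L[s]
    · simp only [solInner, PySem.List.pyGetD_natCast, PySem.List.pySetD_natCast,
        List.getD_eq_getElem _ _ hs]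
      simp [hab, List.getElem?_eq_getElem hs]
    · have hcast : (s : Int) + 1 = ((s + 1 : Nat) : Int) := by push_cast; ring
      simp only [solInner, PySem.List.pyGetD_natCast, List.getD_eq_getElem _ _ hs]
      rw [if_neg hab, hcast, ih (s + 1) L ans (by omega)]
      have hdec : (decide (a < L[s]) = true) = False := by simp [hab]
      cases hf : (L.drop (s + 1)).findIdx? (fun x => a < x) with
      | none => simp [hab]
      | some j =>
        have harith : s + 1 + j = s + (j + 1) := by omega
        simp only [hf, Option.map_some, hdec]
        simp [harith]

-- getD / set on an append, at an offset past the left part.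
lemma getD_append_add (l₁ l₂ : List Int) (j : Nat) (d : Int) :
    (l₁ ++ l₂).getD (l₁.length + j) d = l₂.getD j d := by
  induction l₁ with
  | nil => simp
  | cons a l ih =>
    rw [List.cons_append, List.length_cons, Nat.add_right_comm, List.getD_cons_succ]
    exact ih

lemma set_append_add (l₁ l₂ : List Int) (j : Nat) (v : Int) :
    (l₁ ++ l₂).set (l₁.length + j) v = l₁ ++ l₂.set j v := by
  induction l₁ with
  | nil => simp
  | cons a l ih =>
    rw [List.cons_append, List.length_cons, Nat.add_right_comm, List.set_cons_succ,
      ih, List.cons_append]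

-- A's outer loop, peeled one position at a time: processed prefixes of A and B are frozen.
lemma loopA_eq_aux : ∀ (n : Nat) (bs : List Int), bs.length ≤ n →
    ∀ (as asPre pre : List Int) (ans : Int),
    pre.length = asPre.length → bs.length ≤ as.length →
    ((PySem.List.pyRange (pre.length : Int) ((pre.length + bs.length : Nat) : Int) 1).foldl
        (stepA (asPre ++ as)) (pre ++ bs, ans)).2 = ans + fA as bs := by
  intro n
  induction n with
  | zero =>
    intro bs hn as asPre pre ans h1 h2
    have : bs = [] := List.eq_nil_of_length_eq_zero (by omega)
    subst this
    rw [PySem.List.pyRange_one_eq_nil (by simp)]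
    simp [fA_nil]
  | succ n ih =>
    intro bs hn as asPre pre ans h1 h2
    cases bs with
    | nil =>
      rw [PySem.List.pyRange_one_eq_nil (by simp)]
      simp [fA_nil]
    | cons b rest =>
    cases as with
    | nil => simp at h2
    | cons a as' =>
      rw [PySem.List.pyRange_one_cons
        (by simp only [List.length_cons]; push_cast; omega)]
      simp only [List.foldl_cons, List.length_cons]
      have hA : PySem.List.pyGetD (asPre ++ a :: as') ((pre.length : Nat) : Int) 0 = a := by
        rw [PySem.List.pyGetD_natCast, h1, getD_append_len]
      have hB : PySem.List.pyGetD (pre ++ b :: rest) ((pre.length : Nat) : Int) 0 = b := by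
        rw [PySem.List.pyGetD_natCast, getD_append_len]
      have hc2 : ((pre.length + (rest.length + 1) : Nat) : Int)
          = ((pre.length + 1 + rest.length : Nat) : Int) := by push_cast; ring
      by_cases hab : a < b
      · rw [show stepA (asPre ++ a :: as') (pre ++ b :: rest, ans) ((pre.length : Nat) : Int)
              = (pre ++ b :: rest, ans + 1) from by simp [stepA, hA, hB, hab]]
        have := ih rest (by simpa using hn) as' (asPre ++ [a]) (pre ++ [b]) (ans + 1) (by simp [h1]) (by simpa using h2)
        simp only [List.append_assoc, List.cons_append, List.nil_append,
          List.length_append, List.length_cons, List.length_nil, Nat.zero_add,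
          Nat.add_zero] at this
        have hc1 : ((pre.length : Int)) + 1 = ((pre.length + 1 : Nat) : Int) := by push_cast; ring
        rw [hc1, hc2, this]
        rw [show fA (a :: as') (b :: rest) = fA as' rest + 1 from by simp [fA, hab]]
        ring
      · rw [show stepA (asPre ++ a :: as') (pre ++ b :: rest, ans) ((pre.length : Nat) : Int)
              = solInner a ((pre.length : Nat) : Int)
                  (PySem.List.pyRange (((pre.length : Nat) : Int) + 1)
                    (((pre ++ b :: rest).length : Nat) : Int) 1) (pre ++ b :: rest, ans)
              from by simp [stepA, hA, hB, hab]]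
        have hc1 : ((pre.length : Int)) + 1 = ((pre.length + 1 : Nat) : Int) := by push_cast; ring
        rw [hc1, solInner_eq a pre.length rest.length (pre.length + 1) (pre ++ b :: rest) ans
          (by simp; omega)]
        have hdropL : (pre ++ b :: rest).drop (pre.length + 1) = rest := by
          rw [show pre ++ b :: rest = (pre ++ [b]) ++ rest from by simp,
            show pre.length + 1 = (pre ++ [b]).length from by simp, List.drop_left]
        rw [hdropL]
        cases hf : rest.findIdx? (fun x => a < x) with
        | none =>
          simp only []
          have := ih rest (by simpa using hn) as' (asPre ++ [a]) (pre ++ [b]) ans (by simp [h1]) (by simpa using h2)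
          simp only [List.append_assoc, List.cons_append, List.nil_append,
            List.length_append, List.length_cons, List.length_nil, Nat.zero_add,
            Nat.add_zero] at this
          rw [hc2, this]
          rw [show fA (a :: as') (b :: rest) = fA as' rest from by simp [fA, hab, hf]]
        | some j =>
          obtain ⟨hjlen, hpj, hminj⟩ := List.findIdx?_eq_some_iff_getElem.mp hf
          simp only []
          have hgd1 : (pre ++ b :: rest).getD (pre.length + 1 + j) 0 = rest[j] := by
            rw [show pre ++ b :: rest = (pre ++ [b]) ++ rest from by simp,
              show pre.length + 1 + j = (pre ++ [b]).length + j from by simp,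
              getD_append_add, List.getD_eq_getElem _ _ hjlen]
          have hgd2 : (pre ++ b :: rest).getD pre.length 0 = b := getD_append_len pre b rest 0
          have hset1 : (pre ++ b :: rest).set pre.length (rest[j]) = pre ++ rest[j] :: rest :=
            set_append_len pre b (rest[j]) rest
          have hset2 : (pre ++ rest[j] :: rest).set (pre.length + 1 + j) b
              = pre ++ rest[j] :: rest.set j b := by
            rw [show pre ++ rest[j] :: rest = (pre ++ [rest[j]]) ++ rest from by simp,
              show pre.length + 1 + j = (pre ++ [rest[j]]).length + j from by simp,
              set_append_add, List.append_assoc, List.singleton_append]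
          rw [hgd1, hgd2, hset1, hset2]
          have := ih (rest.set j b) (by simpa [List.length_set] using hn) as' (asPre ++ [a])
            (pre ++ [rest[j]]) (ans + 1) (by simp [h1])
            (by simpa [List.length_set] using h2)
          simp only [List.append_assoc, List.cons_append, List.nil_append,
            List.length_append, List.length_cons, List.length_nil, Nat.zero_add,
            Nat.add_zero, List.length_set] at this
          rw [hc2, this]
          rw [show fA (a :: as') (b :: rest) = fA as' (rest.set j b) + 1 from by
            simp [fA, hab, hf]]
          ring

lemma loopA_eq (bs as asPre pre : List Int) (ans : Int)
    (h1 : pre.length = asPre.length) (h2 : bs.length ≤ as.length) :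
    ((PySem.List.pyRange (pre.length : Int) ((pre.length + bs.length : Nat) : Int) 1).foldl
        (stepA (asPre ++ as)) (pre ++ bs, ans)).2 = ans + fA as bs :=
  loopA_eq_aux bs.length bs le_rfl as asPre pre ans h1 h2

-- When nothing in bs exceeds c and every a ≥ c, A's loop counts nothing.
lemma fA_zero : ∀ (bs as : List Int) (c : Int), (∀ a ∈ as, c ≤ a) → (∀ b ∈ bs, b ≤ c) →
    fA as bs = 0 := by
  intro bs
  induction bs with
  | nil => intro as c _ _; exact fA_nil as
  | cons b rest ih =>
    intro as c hA hB
    cases as with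
    | nil => exact fA_nil_left _
    | cons a as' =>
      have hba : ¬ a < b := by
        have h1 := hA a (by simp); have h2 := hB b (by simp); omega
      have hfnone : rest.findIdx? (fun x => a < x) = none := by
        rw [List.findIdx?_eq_none_iff]
        intro x hx
        have h1 := hA a (by simp); have h2 := hB x (by simp [hx])
        simp; omega
      rw [show fA (a :: as') (b :: rest) = fA as' rest from by simp [fA, hba, hfnone]]
      exact ih as' c (fun y hy => hA y (by simp [hy])) (fun y hy => hB y (by simp [hy]))

-- Elements ≤ every a are skipped by gB and may be filtered away.
lemma gB_skip : ∀ (bs as : List Int) (c : Int), (∀ a ∈ as, c ≤ a) →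
    gB as (bs.filter (fun b => c < b)) = gB as bs := by
  intro bs
  induction bs with
  | nil => intro as c _; simp
  | cons b rest ih =>
    intro as c h
    by_cases hcb : c < b
    · rw [List.filter_cons_of_pos (by simp [hcb])]
      cases as with
      | nil => simp [gB_nil_left]
      | cons a as' =>
        by_cases hab : a < b
        · rw [show gB (a :: as') (b :: rest.filter (fun x => c < x))
                = gB as' (rest.filter (fun x => c < x)) + 1 from by simp [gB, hab],
            show gB (a :: as') (b :: rest) = gB as' rest + 1 from by simp [gB, hab],
            ih as' c (fun y hy => h y (by simp [hy]))]
        · rw [show gB (a :: as') (b :: rest.filter (fun x => c < x))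
                = gB (a :: as') (rest.filter (fun x => c < x)) from by simp [gB, hab],
            show gB (a :: as') (b :: rest) = gB (a :: as') rest from by simp [gB, hab],
            ih (a :: as') c h]
    · rw [List.filter_cons_of_neg (by simp [hcb])]
      cases as with
      | nil => simp [gB_nil_left]
      | cons a as' =>
        have hab : ¬ a < b := by have := h a (by simp); omega
        rw [show gB (a :: as') (b :: rest) = gB (a :: as') rest from by simp [gB, hab],
          ih (a :: as') c h]

lemma fA_eq_gB_aux : ∀ (n : Nat) (bs : List Int) (a : Int) (as : List Int),
    bs.length ≤ n → (a :: as).Pairwise (· ≤ ·) →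
    (bs.filter (fun b => a < b)).Pairwise (· ≤ ·) →
    fA (a :: as) bs = gB (a :: as) (bs.filter (fun b => a < b)) := by
  intro n
  induction n with
  | zero =>
    intro bs a as hlen _ _
    have : bs = [] := List.eq_nil_of_length_eq_zero (by omega)
    subst this
    simp [fA_nil, gB]
  | succ n ih =>
    intro bs a as hlen hsort hfsort
    cases bs with
    | nil => simp [fA_nil, gB]
    | cons b rest =>
      by_cases hab : a < b
      · rw [List.filter_cons_of_pos (by simp [hab])] at hfsort ⊢
        rw [show fA (a :: as) (b :: rest) = fA as rest + 1 from by simp [fA, hab],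
          show gB (a :: as) (b :: rest.filter (fun x => a < x))
            = gB as (rest.filter (fun x => a < x)) + 1 from by simp [gB, hab]]
        congr 1
        cases as with
        | nil => simp [fA_nil_left, gB_nil_left]
        | cons a1 as1 =>
          have ha1 : a ≤ a1 := (List.pairwise_cons.mp hsort).1 a1 (by simp)
          have hsort1 : (a1 :: as1).Pairwise (· ≤ ·) := (List.pairwise_cons.mp hsort).2
          have hmin : ∀ y ∈ a1 :: as1, a1 ≤ y := by
            intro y hy
            rcases List.mem_cons.mp hy with rfl | hy
            · exact le_refl _
            · exact (List.pairwise_cons.mp hsort1).1 y hy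
          have hfilter : rest.filter (fun x => a1 < x)
              = (rest.filter (fun x => a < x)).filter (fun x => a1 < x) := by
            rw [List.filter_filter]
            refine (List.filter_congr ?_).symm
            intro x hx
            by_cases h1 : a1 < x
            · simp [h1]; omega
            · simp [h1]
          have hfsortrest : (rest.filter (fun x => a < x)).Pairwise (· ≤ ·) :=
            (List.pairwise_cons.mp hfsort).2
          rw [ih rest a1 as1 (by simpa using hlen) hsort1
              (by rw [hfilter]; exact hfsortrest.filter _),
            hfilter]
          exact gB_skip (rest.filter (fun x => a < x)) (a1 :: as1) a1 hmin
      · rw [List.filter_cons_of_neg (by simp [hab])] at hfsort ⊢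
        cases hf : rest.findIdx? (fun x => a < x) with
        | none =>
          have hrest0 : rest.filter (fun x => a < x) = [] := by
            rw [List.filter_eq_nil_iff]
            intro x hx
            have := List.findIdx?_eq_none_iff.mp hf x hx
            simpa using this
          rw [hrest0, show fA (a :: as) (b :: rest) = fA as rest from by simp [fA, hab, hf],
            show gB (a :: as) [] = 0 from by simp [gB]]
          refine fA_zero rest as a (fun y hy => (List.pairwise_cons.mp hsort).1 y hy) ?_
          intro x hx
          have := List.findIdx?_eq_none_iff.mp hf x hx
          simp at this
          omega
        | some j =>
          obtain ⟨hjlen, hpj, hminj⟩ := List.findIdx?_eq_some_iff_getElem.mp hf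
          have hm : a < rest[j] := by simpa using hpj
          have hsplit : rest = rest.take j ++ rest[j] :: rest.drop (j + 1) := by
            conv_lhs => rw [← List.take_append_drop j rest]
            rw [List.drop_eq_getElem_cons hjlen]
          have hlenTake : (rest.take j).length = j := List.length_take_of_le (le_of_lt hjlen)
          have hset : rest.set j b = rest.take j ++ b :: rest.drop (j + 1) := by
            conv_lhs => rw [hsplit]
            have h0 := set_append_len (rest.take j) (rest[j]) b (rest.drop (j + 1))
            rw [hlenTake] at h0
            exact h0
          have hu : ∀ x ∈ rest.take j, ¬ a < x := by
            intro x hx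
            obtain ⟨i, hi, rfl⟩ := List.getElem_of_mem hx
            have hij : i < j := by simpa [hlenTake] using hi
            have h2 := hminj i hij
            have hgt : (rest.take j)[i] = rest[i]'(by omega) := List.getElem_take
            rw [hgt]
            simpa using h2
          have hfilter_rest : rest.filter (fun x => a < x)
              = rest[j] :: (rest.drop (j + 1)).filter (fun x => a < x) := by
            conv_lhs => rw [hsplit]
            rw [List.filter_append,
              List.filter_eq_nil_iff.mpr (by intro x hx; simpa using hu x hx),
              List.filter_cons_of_pos (by simp [hm]), List.nil_append]
          rw [hfilter_rest,
            show fA (a :: as) (b :: rest) = fA as (rest.set j b) + 1 from by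
              simp [fA, hab, hf],
            show gB (a :: as) (rest[j] :: (rest.drop (j + 1)).filter (fun x => a < x))
              = gB as ((rest.drop (j + 1)).filter (fun x => a < x)) + 1 from by
              simp [gB, hm]]
          congr 1
          cases as with
          | nil => simp [fA_nil_left, gB_nil_left]
          | cons a1 as1 =>
            have ha1 : a ≤ a1 := (List.pairwise_cons.mp hsort).1 a1 (by simp)
            have hsort1 : (a1 :: as1).Pairwise (· ≤ ·) := (List.pairwise_cons.mp hsort).2
            have hmin : ∀ y ∈ a1 :: as1, a1 ≤ y := by
              intro y hy
              rcases List.mem_cons.mp hy with rfl | hy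
              · exact le_refl _
              · exact (List.pairwise_cons.mp hsort1).1 y hy
            have hfv : ((rest.drop (j + 1)).filter (fun x => a < x)).Pairwise (· ≤ ·) := by
              rw [hfilter_rest] at hfsort
              exact (List.pairwise_cons.mp hfsort).2
            have heq1 : (rest.set j b).filter (fun x => a1 < x)
                = ((rest.drop (j + 1)).filter (fun x => a < x)).filter
                    (fun x => a1 < x) := by
              rw [hset, List.filter_append, List.filter_filter,
                List.filter_eq_nil_iff.mpr (by
                  intro x hx
                  have := hu x hx
                  simp; omega),
                List.filter_cons_of_neg (by simp; omega), List.nil_append]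
              refine (List.filter_congr ?_).symm
              intro x hx
              by_cases h1 : a1 < x
              · simp [h1]; omega
              · simp [h1]
            rw [ih (rest.set j b) a1 as1 (by simpa [List.length_set] using hlen) hsort1
                (by rw [heq1]; exact hfv.filter _),
              heq1]
            exact gB_skip ((rest.drop (j + 1)).filter (fun x => a < x)) (a1 :: as1) a1 hmin

lemma fA_eq_gB (as bs : List Int) (ha : as.Pairwise (· ≤ ·)) (hb : bs.Pairwise (· ≤ ·)) :
    fA as bs = gB as bs := by
  cases as with
  | nil => simp [fA_nil_left, gB_nil_left]
  | cons a as' =>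
    have hmin : ∀ y ∈ a :: as', a ≤ y := by
      intro y hy
      rcases List.mem_cons.mp hy with rfl | hy
      · exact le_refl _
      · exact (List.pairwise_cons.mp ha).1 y hy
    rw [fA_eq_gB_aux bs.length bs a as' le_rfl ha (hb.filter _)]
    exact gB_skip bs (a :: as') a hmin

-- B's fold with the Int counter equals gB on the not-yet-consumed suffix of As.
lemma alt_loop (As : List Int) : ∀ (bs : List Int) (k : Nat),
    bs.foldl
      (fun count b =>
        if count < (As.length : Int) ∧ PySem.List.pyGetD As count 0 < b then count + 1
        else count)
      (k : Int) = (k : Int) + gB (As.drop k) bs := by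
  intro bs
  induction bs with
  | nil => intro k; simp [gB]
  | cons b rest ih =>
    intro k
    simp only [List.foldl_cons]
    by_cases hk : k < As.length
    · have hget : PySem.List.pyGetD As ((k : Nat) : Int) 0 = As[k] := by
        rw [PySem.List.pyGetD_natCast, List.getD_eq_getElem _ _ hk]
      by_cases hbk : As[k] < b
      · rw [if_pos ⟨by exact_mod_cast hk, by rw [hget]; exact hbk⟩]
        rw [show ((k : Nat) : Int) + 1 = ((k + 1 : Nat) : Int) from by push_cast; ring,
          ih (k + 1), List.drop_eq_getElem_cons hk, gB_cons_cons, if_pos hbk]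
        push_cast
        ring
      · rw [if_neg (by rintro ⟨_, h2⟩; rw [hget] at h2; exact hbk h2)]
        rw [ih k, List.drop_eq_getElem_cons hk, gB_cons_cons, if_neg hbk]
    · have hdrop : As.drop k = [] := List.drop_eq_nil_of_le (by omega)
      rw [if_neg (by rintro ⟨h1, _⟩; exact hk (by exact_mod_cast h1))]
      rw [ih k, hdrop, gB_nil_left, gB_nil_left]

-- ===== VERDICT (by name: the statement is the Claim_ definition above) =====
theorem solution_spec : Claim_equal_solution := by
  intro A B _ hpre
  unfold Spec_solution solution solution_alt
  have hsortA : (PySem.List.sorted A (fun x => x)).Pairwise (· ≤ ·) := by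
    simpa using PySem.List.sorted_pairwise A (fun x => x)
  have hsortB : (PySem.List.sorted B (fun x => x)).Pairwise (· ≤ ·) := by
    simpa using PySem.List.sorted_pairwise B (fun x => x)
  have hlen : (PySem.List.sorted B (fun x => x)).length
      ≤ (PySem.List.sorted A (fun x => x)).length := by
    rw [PySem.List.length_sorted, PySem.List.length_sorted]
    exact hpre
  have hA := loopA_eq (PySem.List.sorted B (fun x => x)) (PySem.List.sorted A (fun x => x))
    [] [] 0 rfl hlen
  simp only [List.nil_append, List.length_nil, Nat.zero_add, Nat.cast_zero, zero_add] at hA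
  have hBalt := alt_loop (PySem.List.sorted A (fun x => x)) (PySem.List.sorted B (fun x => x)) 0
  simp only [Nat.cast_zero, List.drop_zero, zero_add] at hBalt
  rw [hA, hBalt, fA_eq_gB _ _ hsortA hsortB]
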